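-- pv_equiv track=rewrite | github.com/kedin593/HW-4 | jailbreak.py | pattern_x_bottom
-- ===== SOURCE A (Python) =====
-- def pattern_x_bottom(size: int = 13, space: str = ' ', fill: str = 'x') -> str:
--     """ Going to make the bottom part of the x pattern
--         Args:
--             size(int): the size of the X pattern
--             space(str): the string that will fill the spaces around the X pattern
--             fill(str): the string that will create the X pattern
--         Returns:
--             str: the bottom part of the X pattern
--
--
--     """
--     x = ''
--     lines = 0
--     fill_count = 0
--     remove = 1
--     yo = int((size - 1) / 2)
--     while lines <= size:
--         if (lines % 2 == 1) and (lines == 1):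
--             x += space + (space * (yo - remove)) + (fill * fill_count) + \
--                 (space * (yo - remove)) + (space) + "\n"
--         if (lines % 2 == 1) and (lines > 1):
--             x += (space * (yo - remove)) + (fill) + (space *
--                                                      (fill_count - 2)) + (fill) + (space * (yo - remove)) + "\n"
--             remove += 1
--         fill_count += 1
--         lines += 1
--
--     return x
-- ===== SOURCE B (Python) =====
-- def pattern_x_bottom(size: int = 13, space: str = ' ', fill: str = 'x') -> str:
--     """Bottom half of the X pattern, rendered as a character grid: for each row
--     decide cell by cell (column membership in the two mark positions) instead of
--     concatenating padding runs."""
--     yo = (size - 1) // 2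
--     width = 2 * yo + 1
--     out = []
--     for k in range(yo + 1):
--         marks = {yo - k, yo + k}
--         out.append(''.join(fill if c in marks else space for c in range(width)) + '\n')
--     return ''.join(out)
-- ===== Notes on version B (the rewrite author's own statement) =====
-- stated objective: alternative
-- what changed: Replaces A's stateful while-loop over all lines 0..size (threading fill_count/remove accumulators and concatenating padding runs) by rendering each of the yo+1 rows as a character grid: every column cell is decided by membership in the two mark positions {yo-k, yo+k}, and rows are collected and joined once.
-- intended difference: For size 1 or 2 with a nonempty space string, A's first-line template keeps its two literal outer spaces around negative-count multiplications and returns space+fill+space+'\n' (a width-3 row though the pattern width is 1); B returns fill+'\n', the width-1 row consistent with every larger size. — e.g. on pattern_x_bottom(1, " ", "x"): A returns " x \n", B returns "x\n"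
import Mathlib
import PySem

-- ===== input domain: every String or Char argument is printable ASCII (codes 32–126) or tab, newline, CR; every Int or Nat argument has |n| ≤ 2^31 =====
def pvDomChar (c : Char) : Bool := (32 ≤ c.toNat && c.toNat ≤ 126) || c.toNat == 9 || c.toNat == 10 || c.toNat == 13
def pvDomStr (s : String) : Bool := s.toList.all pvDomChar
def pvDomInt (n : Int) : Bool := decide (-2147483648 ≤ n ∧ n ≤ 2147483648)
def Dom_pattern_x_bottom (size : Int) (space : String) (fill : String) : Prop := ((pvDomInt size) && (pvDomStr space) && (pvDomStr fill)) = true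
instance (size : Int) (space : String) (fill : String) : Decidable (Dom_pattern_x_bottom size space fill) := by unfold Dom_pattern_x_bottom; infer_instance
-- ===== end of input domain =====

-- B renders the pattern as a character grid — per row it decides every column cell by
-- membership in the two mark positions — instead of A's stateful accumulator loop that
-- concatenates padding runs (objective: alternative). On sizes 1 and 2 B's first row is
-- the width-1 row consistent with larger sizes; see D_ below.

-- Python 'str * int' (negative count gives ""); shared primitive of both ports
def strMul (s : String) (n : Int) : String := String.ofList (PySem.List.pyRepeat s.toList n)

-- ===== PORT A =====
-- the while-loop: fuel = number of remaining iterations; state (lines, fill_count, remove, x)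
def pxbLoop (space fill : String) (yo : Int) : Nat → Int → Int → Int → String → String
  | 0, _lines, _fc, _r, x => x
  | Nat.succ n, lines, fc, r, x =>
      let x1 := if lines % 2 = 1 ∧ lines = 1 then
          x ++ space ++ strMul space (yo - r) ++ strMul fill fc ++ strMul space (yo - r) ++ space ++ "\n"
        else x
      let x2 := if lines % 2 = 1 ∧ 1 < lines then
          x1 ++ strMul space (yo - r) ++ fill ++ strMul space (fc - 2) ++ fill ++ strMul space (yo - r) ++ "\n"
        else x1
      let r2 := if lines % 2 = 1 ∧ 1 < lines then r + 1 else r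
      pxbLoop space fill yo n (lines + 1) (fc + 1) r2 x2

def pattern_x_bottom (size : Int) (space : String) (fill : String) : String :=
  -- int((size - 1) / 2) truncates toward zero; exact since |size| ≤ 2^31 keeps the float division exact
  let yo := Int.tdiv (size - 1) 2
  pxbLoop space fill yo (size + 1).toNat 0 0 1 ""

-- ===== PORT B =====
-- one grid row: cell c is fill iff c is in the 2-element mark set {yo-k, yo+k}
def pxbRowB (space fill : String) (yo k : Int) : String :=
  PySem.Str.join "" ((PySem.List.pyRange 0 (2 * yo + 1) 1).foldl
      (fun acc c => acc ++ [if c = yo - k ∨ c = yo + k then fill else space]) []) ++ "\n"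

def pattern_x_bottom_alt (size : Int) (space : String) (fill : String) : String :=
  let yo := PySem.Int.floordiv (size - 1) 2
  PySem.Str.join "" ((PySem.List.pyRange 0 (yo + 1) 1).foldl
      (fun acc k => acc ++ [pxbRowB space fill yo k]) [])

-- ===== PRECONDITION & SPEC =====
-- For size 1 or 2 with nonempty space A's first-line template keeps its two literal outer
-- spaces around negative-count multiplications, returning space+fill+space+'\n' (a width-3
-- row though the pattern width is 1); B returns fill+'\n', the width-1 row consistent with
-- every larger size.
def D_pattern_x_bottom (size : Int) (space : String) (fill : String) : Prop :=
  (size = 1 ∨ size = 2) ∧ space ≠ ""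
instance (size : Int) (space : String) (fill : String) : Decidable (D_pattern_x_bottom size space fill) := by unfold D_pattern_x_bottom; infer_instance

def Spec_pattern_x_bottom (size : Int) (space : String) (fill : String) (out : String) : Prop := ¬ D_pattern_x_bottom size space fill → out = pattern_x_bottom_alt size space fill
instance (size : Int) (space : String) (fill : String) (out : String) : Decidable (Spec_pattern_x_bottom size space fill out) := by unfold Spec_pattern_x_bottom; infer_instance

def pvDiffWitness_pattern_x_bottom : Int × String × String := (1, " ", "x")
def pvDiffWitnessOut_pattern_x_bottom : String × String := (" x \n", "x\n")

-- ===== CLAIM (what is proved, stated in full; the proofs are below) =====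
def Claim_unchanged_pattern_x_bottom : Prop := ∀ (size : Int) (space : String) (fill : String), Dom_pattern_x_bottom size space fill → Spec_pattern_x_bottom size space fill (pattern_x_bottom size space fill)
def Claim_changed_pattern_x_bottom : Prop := Dom_pattern_x_bottom (pvDiffWitness_pattern_x_bottom.1) (pvDiffWitness_pattern_x_bottom.2.1) (pvDiffWitness_pattern_x_bottom.2.2) ∧ D_pattern_x_bottom (pvDiffWitness_pattern_x_bottom.1) (pvDiffWitness_pattern_x_bottom.2.1) (pvDiffWitness_pattern_x_bottom.2.2) ∧ pattern_x_bottom (pvDiffWitness_pattern_x_bottom.1) (pvDiffWitness_pattern_x_bottom.2.1) (pvDiffWitness_pattern_x_bottom.2.2) = pvDiffWitnessOut_pattern_x_bottom.1 ∧ pattern_x_bottom_alt (pvDiffWitness_pattern_x_bottom.1) (pvDiffWitness_pattern_x_bottom.2.1) (pvDiffWitness_pattern_x_bottom.2.2) = pvDiffWitnessOut_pattern_x_bottom.2 ∧ pvDiffWitnessOut_pattern_x_bottom.1 ≠ pvDiffWitnessOut_pattern_x_bottom.2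
def Claim_exact_pattern_x_bottom : Prop := ∀ (size : Int) (space : String) (fill : String), Dom_pattern_x_bottom size space fill → D_pattern_x_bottom size space fill → pattern_x_bottom size space fill ≠ pattern_x_bottom_alt size space fill

-- ===== LEMMAS AND PROOFS =====

theorem charsJoin_empty (parts : List (List Char)) : PySem.Chars.join [] parts = parts.flatten := by
  induction parts with
  | nil => simp [PySem.Chars.join_nil]
  | cons p rest ih =>
      cases rest with
      | nil => simp [PySem.Chars.join, List.intercalate]
      | cons q t => rw [PySem.Chars.join_cons_cons]; simp_all

theorem foldlRows {α : Type} (f : α → String) (l : List α) (acc : List String) :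
    l.foldl (fun rows L => rows ++ [f L]) acc = acc ++ l.map f := by
  induction l generalizing acc with
  | nil => simp
  | cons a l ih => simp [List.foldl, ih]

theorem pyRepeat_natCast' (cs : List Char) (m : Nat) :
    PySem.List.pyRepeat cs (m : Int) = (List.replicate m cs).flatten := by
  simp [PySem.List.pyRepeat]

theorem strMul_one (s : String) : strMul s 1 = s := by
  apply String.toList_inj.mp; simp [strMul, PySem.List.pyRepeat]

theorem fdiv_two_eq (a : Int) : Int.fdiv a 2 = a / 2 := by
  rw [Int.fdiv_eq_ediv, if_pos (Or.inl (by norm_num))]; ring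

-- ---- A's loop characterised as a join of per-line padding-run rows ----

def pxbRowA (space fill : String) (yo L : Int) : String :=
  if L = 1 then
    space ++ strMul space (yo - 1) ++ fill ++ strMul space (yo - 1) ++ space ++ "\n"
  else
    strMul space (yo - PySem.Int.floordiv (L - 1) 2) ++ fill ++ strMul space (L - 2) ++ fill
      ++ strMul space (yo - PySem.Int.floordiv (L - 1) 2) ++ "\n"

-- the odd line numbers among l, l+1, …, l+n-1
def oddLines : Nat → Int → List Int
  | 0, _ => []
  | Nat.succ n, l => (if l % 2 = 1 then [l] else []) ++ oddLines n (l + 1)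

theorem pyRange_two_cons (a b : Int) (h : a < b) :
    PySem.List.pyRange a b 2 = a :: PySem.List.pyRange (a + 2) b 2 := by
  rw [PySem.List.pyRange_of_pos a b (by norm_num), PySem.List.pyRange_of_pos (a + 2) b (by norm_num)]
  rcases Nat.exists_eq_succ_of_ne_zero (n := ((b - a + 2 - 1) / 2).toNat) (by omega) with ⟨M, hM⟩
  rw [if_pos h, hM, List.range_succ_eq_map]
  by_cases h2 : a + 2 < b
  · rw [if_pos h2]
    have : ((b - (a + 2) + 2 - 1) / 2).toNat = M := by omega
    rw [this]
    simp [List.map_map, Function.comp]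
    intro k _
    ring
  · rw [if_neg h2]
    have : M = 0 := by omega
    simp [this]

theorem oddLines_eq_pyRange : ∀ (n : Nat) (l : Int), l % 2 = 1 →
    oddLines n l = PySem.List.pyRange l (l + n) 2 := by
  intro n
  induction n using Nat.strong_induction_on with
  | _ n ih =>
    intro l hl
    match n with
    | 0 =>
        simp only [Nat.cast_zero, add_zero]
        rw [PySem.List.pyRange_of_pos l l (by norm_num), if_neg (by omega)]
        simp [oddLines]
    | 1 =>
        push_cast
        rw [pyRange_two_cons l (l + 1) (by omega)]
        rw [PySem.List.pyRange_of_pos (l + 2) (l + 1) (by norm_num), if_neg (by omega)]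
        simp [oddLines, hl]
    | (m + 2) =>
        push_cast
        rw [pyRange_two_cons l (l + ((m : Int) + 2)) (by omega)]
        have hne : ¬ ((l + 1) % 2 = 1) := by omega
        have h2 := ih m (by omega) (l + 2) (by omega)
        simp only [oddLines, if_pos hl, if_neg hne, List.singleton_append, List.nil_append]
        have e : l + 1 + 1 = l + 2 := by ring
        rw [e, h2]
        have h3 : l + 2 + (m : Int) = l + ((m : Int) + 2) := by ring
        rw [h3]

theorem pxbLoop_eq (space fill : String) (yo : Int) :
    ∀ (n : Nat) (l r : Int) (x : String), 0 ≤ l → r = max 1 (l / 2) →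
    pxbLoop space fill yo n l l r x
      = x ++ PySem.Str.join "" ((oddLines n l).map (pxbRowA space fill yo)) := by
  intro n
  induction n with
  | zero =>
      intro l r x _ _
      apply String.toList_inj.mp
      simp [pxbLoop, oddLines]
  | succ n ih =>
      intro l r x hl hr
      rcases Int.even_or_odd l with he | ho
      · obtain ⟨k, hk⟩ := he
        have hc : ¬ (l % 2 = 1 ∧ l = 1) := by omega
        have hc2 : ¬ (l % 2 = 1 ∧ 1 < l) := by omega
        have hodd : ¬ (l % 2 = 1) := by omega
        simp only [pxbLoop]
        rw [if_neg hc, if_neg hc2, if_neg hc2]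
        rw [ih (l + 1) r x (by omega) (by omega)]
        simp [oddLines, hodd]
      · obtain ⟨k, hk⟩ := ho
        by_cases h1 : l = 1
        · subst h1
          have hr1 : r = 1 := by omega
          subst hr1
          have hc : ((1 : Int) % 2 = 1 ∧ (1 : Int) = 1) := by omega
          have hc2 : ¬ ((1 : Int) % 2 = 1 ∧ 1 < (1 : Int)) := by omega
          simp only [pxbLoop]
          norm_num
          rw [ih 2 1 _ (by omega) (by decide)]
          have hodd : ((1 : Int) % 2 = 1) := by decide
          simp only [oddLines, if_pos hodd, List.singleton_append, List.map_cons]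
          apply String.toList_inj.mp
          simp [charsJoin_empty, pxbRowA, strMul_one]
        · have hl3 : 3 ≤ l := by omega
          have hc : ¬ (l % 2 = 1 ∧ l = 1) := by omega
          have hc2 : (l % 2 = 1 ∧ 1 < l) := by omega
          have hrl : r = l / 2 := by omega
          subst hrl
          simp only [pxbLoop]
          rw [if_neg hc, if_pos hc2, if_pos hc2]
          rw [ih (l + 1) (l / 2 + 1) _ (by omega) (by omega)]
          have hodd : (l % 2 = 1) := by omega
          simp only [oddLines, if_pos hodd, List.singleton_append, List.map_cons]
          have hdd : (l - 1) / 2 = l / 2 := by omega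
          apply String.toList_inj.mp
          simp [charsJoin_empty, pxbRowA, if_neg h1, hdd]

-- ---- B's grid row characterised as padding runs ----

theorem flatten_map_const {α : Type} (l : List α) (S : List Char) :
    (l.map (fun _ => S)).flatten = (List.replicate l.length S).flatten := by
  induction l with
  | nil => simp
  | cons a t ih => simp [List.replicate]

theorem map_shift {α : Type} (f : Nat → α) (a b : Nat) :
    (List.range (a+b)).map f = (List.range a).map f ++ (List.range b).map (fun i => f (a+i)) := by
  rw [List.range_add, List.map_append, List.map_map]; rfl

theorem gridRow_flatten (S F : List Char) (n κ : Nat) (hκ : κ ≤ n) :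
    ((List.range (2*n+1)).map (fun c : Nat => if ((c:Int) = (n:Int) - κ ∨ (c:Int) = (n:Int) + κ) then F else S)).flatten
    = (List.replicate (n-κ) S).flatten ++ F
        ++ (if κ = 0 then [] else (List.replicate (2*κ-1) S).flatten ++ F)
        ++ (List.replicate (n-κ) S).flatten := by
  by_cases h0 : κ = 0
  · subst h0
    have e : 2*n+1 = n + (1 + n) := by omega
    rw [e, map_shift, map_shift]
    simp only [List.flatten_append, List.range_one, List.map_cons, List.map_nil]
    have h1 : (List.range n).map (fun c : Nat => if ((c:Int) = (n:Int) - (0:Nat) ∨ (c:Int) = (n:Int) + (0:Nat)) then F else S)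
        = (List.range n).map (fun _ => S) := by
      apply List.map_congr_left; intro i hi; simp only [List.mem_range] at hi
      split_ifs with h
      · exfalso; push_cast at h; omega
      · rfl
    have h3 : (List.range n).map (fun i : Nat => if (((n+(1+i) : Nat):Int) = (n:Int) - (0:Nat) ∨ ((n+(1+i):Nat):Int) = (n:Int) + (0:Nat)) then F else S)
        = (List.range n).map (fun _ => S) := by
      apply List.map_congr_left; intro i hi; simp only [List.mem_range] at hi
      split_ifs with h
      · exfalso; push_cast at h; omega
      · rfl
    rw [h1, h3]
    simp only [flatten_map_const, List.length_range, List.flatten_cons, List.flatten_nil, List.append_nil]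
    split_ifs with h <;> try (exfalso; push_cast at h; omega)
    all_goals simp
  · have e : 2*n+1 = (n-κ) + (1 + ((2*κ-1) + (1 + (n-κ)))) := by omega
    rw [e, map_shift, map_shift, map_shift, map_shift]
    simp only [List.flatten_append, List.range_one, List.map_cons, List.map_nil]
    have h1 : (List.range (n-κ)).map (fun c : Nat => if ((c:Int) = (n:Int) - κ ∨ (c:Int) = (n:Int) + κ) then F else S)
        = (List.range (n-κ)).map (fun _ => S) := by
      apply List.map_congr_left; intro i hi; simp only [List.mem_range] at hi
      split_ifs with h
      · exfalso; push_cast at h; omega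
      · rfl
    have h3 : (List.range (2*κ-1)).map (fun i : Nat => if ((((n-κ)+(1+i) : Nat):Int) = (n:Int) - κ ∨ (((n-κ)+(1+i):Nat):Int) = (n:Int) + κ) then F else S)
        = (List.range (2*κ-1)).map (fun _ => S) := by
      apply List.map_congr_left; intro i hi; simp only [List.mem_range] at hi
      split_ifs with h
      · exfalso; push_cast at h; omega
      · rfl
    have h5 : (List.range (n-κ)).map (fun i : Nat => if ((((n-κ)+(1+((2*κ-1)+(1+i))) : Nat):Int) = (n:Int) - κ ∨ (((n-κ)+(1+((2*κ-1)+(1+i))):Nat):Int) = (n:Int) + κ) then F else S)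
        = (List.range (n-κ)).map (fun _ => S) := by
      apply List.map_congr_left; intro i hi; simp only [List.mem_range] at hi
      split_ifs with h
      · exfalso; push_cast at h; omega
      · rfl
    rw [h1, h3, h5]
    simp only [flatten_map_const, List.length_range, List.flatten_cons, List.flatten_nil, List.append_nil]
    split_ifs with ha hb
    all_goals try (exfalso; push_cast at hb; omega)
    all_goals try (exfalso; push_cast at ha; omega)
    all_goals simp [List.append_assoc]

theorem rowB_chars (space fill : String) (yo k : Int) (hk0 : 0 ≤ k) (hky : k ≤ yo) :
    (pxbRowB space fill yo k).toList =
      (strMul space (yo - k)).toList ++ fill.toList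
        ++ (if k = 0 then [] else (strMul space (2 * k - 1)).toList ++ fill.toList)
        ++ (strMul space (yo - k)).toList ++ ['\n'] := by
  obtain ⟨n, hn⟩ : ∃ n : Nat, yo = n := ⟨yo.toNat, by omega⟩
  obtain ⟨κ, hκ⟩ : ∃ κ : Nat, k = κ := ⟨k.toNat, by omega⟩
  subst hn hκ
  have hκn : κ ≤ n := by exact_mod_cast hky
  rw [pxbRowB, foldlRows]
  have hw : 2 * (n : Int) + 1 = ((2 * n + 1 : Nat) : Int) := by push_cast; ring
  rw [hw, PySem.List.pyRange_zero_natCast]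
  have hsub : (n : Int) - κ = ((n - κ : Nat) : Int) := by omega
  simp only [List.nil_append, String.toList_append, PySem.Str.join, List.map_map,
    String.toList_ofList]
  rw [show "".toList = ([] : List Char) from rfl, charsJoin_empty]
  have hmaps : (List.range (2*n+1)).map (String.toList ∘ (fun c : Int => if c = (n:Int) - κ ∨ c = (n:Int) + κ then fill else space) ∘ (fun k : Nat => (k : Int)))
      = (List.range (2*n+1)).map (fun c : Nat => if ((c:Int) = (n:Int) - κ ∨ (c:Int) = (n:Int) + κ) then fill.toList else space.toList) := by
    apply List.map_congr_left; intro i _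
    simp only [Function.comp]
    exact apply_ite _ _ _ _
  rw [hmaps, gridRow_flatten space.toList fill.toList n κ hκn]
  simp only [strMul, String.toList_ofList]
  rw [hsub, pyRepeat_natCast']
  by_cases h0 : κ = 0
  · subst h0
    simp
  · rw [if_neg h0, if_neg (by exact_mod_cast h0 : ¬ (κ:Int) = 0)]
    have hsub2 : 2 * (κ : Int) - 1 = ((2 * κ - 1 : Nat) : Int) := by omega
    rw [hsub2, pyRepeat_natCast']
    simp [List.append_assoc]

theorem flatten_replicate_comm (S : List Char) (n : Nat) :
    (List.replicate n S).flatten ++ S = S ++ (List.replicate n S).flatten := by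
  induction n with
  | zero => simp
  | succ m ih => simp only [List.replicate_succ, List.flatten_cons, List.append_assoc, ih]

-- A's padding-run row on odd line L = 1 + 2k equals B's grid row
theorem row_eq (space fill : String) (yo k : Int) (hk0 : 0 ≤ k) (hky : k ≤ yo)
    (hsp : yo = 0 → space = "") :
    pxbRowA space fill yo (1 + 2*k) = pxbRowB space fill yo k := by
  apply String.toList_inj.mp
  rw [rowB_chars space fill yo k hk0 hky]
  by_cases h0 : k = 0
  · subst h0
    rw [pxbRowA, if_pos (by norm_num), if_pos rfl]
    by_cases hy : yo = 0
    · rw [hsp hy, hy]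
      simp [strMul, PySem.List.pyRepeat]
    · obtain ⟨n, hn⟩ : ∃ n : Nat, yo = (n : Int) + 1 := ⟨(yo - 1).toNat, by omega⟩
      subst hn
      have e1 : (n : Int) + 1 - 1 = (n : Int) := by ring
      have e2 : (n : Int) + 1 - 0 = ((n + 1 : Nat) : Int) := by push_cast; ring
      rw [e1, e2]
      simp only [String.toList_append, strMul, String.toList_ofList, pyRepeat_natCast',
        List.replicate_succ, List.flatten_cons]
      simp [List.append_assoc, flatten_replicate_comm]
  · rw [pxbRowA, if_neg (by omega)]
    have hfd : PySem.Int.floordiv (1 + 2*k - 1) 2 = k := by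
      rw [PySem.Int.floordiv_eq_ediv_of_pos (by norm_num)]
      omega
    rw [hfd, if_neg h0]
    have e3 : 1 + 2*k - 2 = 2*k - 1 := by ring
    rw [e3]
    simp [List.append_assoc]

-- the odd lines 1,3,…  are exactly 1 + 2k for k = 0,…,yo
theorem odds_as_ks (size yo : Int) (hyo : yo = (size - 1) / 2) (h : 1 ≤ size) :
    PySem.List.pyRange 1 (size + 1) 2 = (PySem.List.pyRange 0 (yo + 1) 1).map (fun k => 1 + 2*k) := by
  rw [PySem.List.pyRange_of_pos 1 (size + 1) (by norm_num), if_pos (by omega)]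
  rw [PySem.List.pyRange_one]
  rw [List.map_map]
  have hc : ((size + 1 - 1 + 2 - 1) / 2).toNat = (yo + 1 - 0).toNat := by omega
  rw [hc]
  apply List.map_congr_left
  intro i _
  simp [Function.comp]

-- evaluations of both ports at the two D_ sizes, used by the tightness proof
theorem portA_size12 (space fill : String) (size : Int) (hs : size = 1 ∨ size = 2) :
    (pattern_x_bottom size space fill).toList = space.toList ++ fill.toList ++ space.toList ++ ['\n'] := by
  rcases hs with h | h <;> subst h
  · show (pxbLoop space fill (Int.tdiv 0 2) 2 0 0 1 "").toList = _
    simp only [pxbLoop, show Int.tdiv 0 2 = 0 from rfl]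
    norm_num
    simp [strMul, PySem.List.pyRepeat]
  · show (pxbLoop space fill (Int.tdiv 1 2) 3 0 0 1 "").toList = _
    simp only [pxbLoop, show Int.tdiv 1 2 = 0 from rfl]
    norm_num
    simp [strMul, PySem.List.pyRepeat]

theorem portB_size12 (space fill : String) (size : Int) (hs : size = 1 ∨ size = 2) :
    (pattern_x_bottom_alt size space fill).toList = fill.toList ++ ['\n'] := by
  rcases hs with h | h <;> subst h
  · show (PySem.Str.join "" ((PySem.List.pyRange 0 (PySem.Int.floordiv 0 2 + 1) 1).foldl _ [])).toList = _
    simp only [show PySem.Int.floordiv 0 2 = 0 from rfl]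
    norm_num [PySem.List.pyRange_one]
    simp [pxbRowB, PySem.Str.join, PySem.List.pyRange_one, List.range_one]
  · show (PySem.Str.join "" ((PySem.List.pyRange 0 (PySem.Int.floordiv 1 2 + 1) 1).foldl _ [])).toList = _
    simp only [show PySem.Int.floordiv 1 2 = 0 from rfl]
    norm_num [PySem.List.pyRange_one]
    simp [pxbRowB, PySem.Str.join, PySem.List.pyRange_one, List.range_one]

-- ===== VERDICT PROOFS =====

theorem pattern_x_bottom_spec : Claim_unchanged_pattern_x_bottom := by
  intro size space fill _
  unfold Spec_pattern_x_bottom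
  intro hnd
  simp only [pattern_x_bottom, pattern_x_bottom_alt]
  rw [foldlRows]
  by_cases h : 1 ≤ size
  · have hyo : Int.tdiv (size - 1) 2 = PySem.Int.floordiv (size - 1) 2 := by
      rw [Int.tdiv_eq_ediv, if_pos (Or.inl (by omega))]
      simp [PySem.Int.floordiv, fdiv_two_eq]
    have hfd : PySem.Int.floordiv (size - 1) 2 = (size - 1) / 2 := by
      simp [PySem.Int.floordiv, fdiv_two_eq]
    rw [pxbLoop_eq space fill (Int.tdiv (size - 1) 2) ((size + 1).toNat) 0 1 "" (by omega) (by decide)]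
    rw [hyo]
    have hfuel : (size + 1).toNat = ((size : Int).toNat + 1) := by omega
    rw [hfuel]
    have h0 : oddLines (size.toNat + 1) 0 = oddLines size.toNat 1 := by
      simp [oddLines]
    rw [h0, oddLines_eq_pyRange size.toNat 1 (by decide)]
    have he : (1 : Int) + size.toNat = size + 1 := by omega
    rw [he, odds_as_ks size (PySem.Int.floordiv (size - 1) 2) hfd h, List.map_map]
    have hsp : PySem.Int.floordiv (size - 1) 2 = 0 → space = "" := by
      intro hz
      have : size = 1 ∨ size = 2 := by rw [hfd] at hz; omega
      by_contra hne
      exact hnd ⟨this, hne⟩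
    have hrows : (PySem.List.pyRange 0 (PySem.Int.floordiv (size - 1) 2 + 1) 1).map
          ((pxbRowA space fill (PySem.Int.floordiv (size - 1) 2)) ∘ (fun k => 1 + 2*k))
        = (PySem.List.pyRange 0 (PySem.Int.floordiv (size - 1) 2 + 1) 1).map
          (pxbRowB space fill (PySem.Int.floordiv (size - 1) 2)) := by
      apply List.map_congr_left
      intro k hk
      rw [PySem.List.mem_pyRange_one] at hk
      exact row_eq space fill _ k hk.1 (by omega) hsp
    rw [hrows]
    apply String.toList_inj.mp
    simp
  · have hr : PySem.List.pyRange 0 (PySem.Int.floordiv (size - 1) 2 + 1) 1 = [] := by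
      apply PySem.List.pyRange_one_eq_nil
      have : PySem.Int.floordiv (size - 1) 2 = (size - 1) / 2 := by
        simp [PySem.Int.floordiv, fdiv_two_eq]
      omega
    rw [hr]
    by_cases h0 : size = 0
    · subst h0
      have hf : ((0 : Int) + 1).toNat = 1 := by norm_num
      rw [hf]
      simp only [pxbLoop]
      norm_num
      apply String.toList_inj.mp
      simp
    · have : (size + 1).toNat = 0 := by omega
      rw [this]
      apply String.toList_inj.mp
      simp [pxbLoop]

theorem pattern_x_bottom_changed : Claim_changed_pattern_x_bottom := by
  unfold Claim_changed_pattern_x_bottom; decide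

theorem pattern_x_bottom_tight : Claim_exact_pattern_x_bottom := by
  intro size space fill _ hd heq
  obtain ⟨hs, hsp⟩ := hd
  have hspl : space.toList ≠ [] := fun hn => hsp (String.toList_inj.mp (by rw [hn]; rfl))
  have hA := portA_size12 space fill size hs
  have hB := portB_size12 space fill size hs
  rw [heq, hB] at hA
  have hlen := congrArg List.length hA
  simp only [List.length_append, List.length_cons, List.length_nil] at hlen
  exact hspl (List.length_eq_zero_iff.mp (by omega))
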